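-- pv_equiv track=rewrite | github.com/FangSrisantisuk/SHORTEST_PATH | src/server/server/routing.py | find_shared_edges
-- ===== SOURCE A (Python) =====
-- def find_shared_edges (subpaths):
--     shared_edges = []
--
--     for i in range(len(subpaths[0]) - 1):
--         edge1 = (subpaths[0][i], subpaths[0][i+1])
--         for j in range(len(subpaths[1]) - 1):
--             edge2 = (subpaths[1][j], subpaths[1][j+1])
--             if edge1 == edge2:
--                 shared_edges.append(edge1)
--     return shared_edges
-- ===== SOURCE B (Python) =====
-- def find_shared_edges(subpaths):
--     path1, path2 = subpaths[0], subpaths[1]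
--     counts = {}
--     for e in zip(path2, path2[1:]):
--         counts[e] = counts.get(e, 0) + 1
--     shared_edges = []
--     for e in zip(path1, path1[1:]):
--         shared_edges.extend([e] * counts.get(e, 0))
--     return shared_edges
-- ===== Notes on version B (the rewrite author's own statement) =====
-- stated objective: faster
-- what changed: Replaces the nested scan of path2 for every edge of path1 with a dict of edge counts over path2 built once, then a single pass over path1's edges emitting each edge count-many times.
-- outside the precondition, e.g. on find_shared_edges([[1]]): A returns [], B raises IndexError; on find_shared_edges([[]]): A returns [], B raises IndexError
import Mathlib
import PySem

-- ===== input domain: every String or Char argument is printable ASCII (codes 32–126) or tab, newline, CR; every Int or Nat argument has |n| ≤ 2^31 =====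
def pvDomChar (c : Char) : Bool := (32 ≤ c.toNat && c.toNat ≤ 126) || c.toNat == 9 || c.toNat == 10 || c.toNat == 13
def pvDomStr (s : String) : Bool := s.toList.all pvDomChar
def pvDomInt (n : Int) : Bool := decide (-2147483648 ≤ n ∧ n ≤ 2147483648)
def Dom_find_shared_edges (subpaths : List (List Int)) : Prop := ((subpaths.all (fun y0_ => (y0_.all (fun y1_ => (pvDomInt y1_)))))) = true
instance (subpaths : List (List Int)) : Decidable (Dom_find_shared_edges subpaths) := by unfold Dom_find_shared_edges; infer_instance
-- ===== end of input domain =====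

-- B replaces A's nested O(n*m) scans with a one-pass dict of path2 edge counts (asymptotically faster).

-- ===== PORT A =====
def find_shared_edges (subpaths : List (List Int)) : List (Int × Int) :=
  let p0 := PySem.List.pyGetD subpaths 0 []
  let p1 := PySem.List.pyGetD subpaths 1 []
  (PySem.List.pyRange 0 ((p0.length : Int) - 1) 1).foldl (fun acc i =>
    let edge1 := (PySem.List.pyGetD p0 i 0, PySem.List.pyGetD p0 (i + 1) 0)
    (PySem.List.pyRange 0 ((p1.length : Int) - 1) 1).foldl (fun acc j =>
      let edge2 := (PySem.List.pyGetD p1 j 0, PySem.List.pyGetD p1 (j + 1) 0)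
      if edge1 = edge2 then acc ++ [edge1] else acc) acc) []

-- ===== PORT B =====
def find_shared_edges_alt (subpaths : List (List Int)) : List (Int × Int) :=
  let path1 := PySem.List.pyGetD subpaths 0 []
  let path2 := PySem.List.pyGetD subpaths 1 []
  let counts := (path2.zip (PySem.List.slice path2 (some 1) none)).foldl
    (fun d e => d.insert e (d.getD e 0 + 1)) PySem.Dict.empty
  (path1.zip (PySem.List.slice path1 (some 1) none)).foldl
    (fun acc e => acc ++ PySem.List.pyRepeat [e] (counts.getD e 0)) []

-- ===== PRECONDITION & SPEC =====
-- Pre_ excludes inputs with fewer than two paths: there Python A raises IndexError,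
-- except that it accidentally returns [] when the only path has length ≤ 1 (the lazy
-- inner loop never touches subpaths[1]); B's natural form raises IndexError on all of them.
def Pre_find_shared_edges (subpaths : List (List Int)) : Prop := 2 ≤ subpaths.length
instance (subpaths : List (List Int)) : Decidable (Pre_find_shared_edges subpaths) := by
  unfold Pre_find_shared_edges; infer_instance
def pvWitness_find_shared_edges : List (List Int) := [[1, 2, 3], [2, 3, 4]]
def Spec_find_shared_edges (subpaths : List (List Int)) (out : List (Int × Int)) : Prop :=
  out = find_shared_edges_alt subpaths
instance (subpaths : List (List Int)) (out : List (Int × Int)) : Decidable (Spec_find_shared_edges subpaths out) := by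
  unfold Spec_find_shared_edges; infer_instance

-- ===== CLAIM (what is proved, stated in full; the proofs are below) =====
def Claim_equal_find_shared_edges : Prop := ∀ (subpaths : List (List Int)), Dom_find_shared_edges subpaths → Pre_find_shared_edges subpaths → Spec_find_shared_edges subpaths (find_shared_edges subpaths)

-- ===== LEMMAS AND PROOFS =====

-- The index-pair view of a path's consecutive edges equals the zip view.
theorem pv_map_edge (p : List Int) :
    (PySem.List.pyRange 0 ((p.length : Int) - 1) 1).map
      (fun i => (PySem.List.pyGetD p i 0, PySem.List.pyGetD p (i + 1) 0))
    = p.zip p.tail := by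
  apply List.ext_getElem
  · simp [PySem.List.length_pyRange_one]
  · intro k h1 h2
    have hk : k < p.length - 1 := by
      simp [PySem.List.length_pyRange_one] at h1; omega
    have hlen : k < (PySem.List.pyRange 0 ((p.length : Int) - 1) 1).length := by
      simp [PySem.List.length_pyRange_one]; omega
    have h0 : (PySem.List.pyRange 0 ((p.length : Int) - 1) 1)[k]'hlen = (k : Int) := by
      rw [PySem.List.getElem_pyRange_one]; ring
    simp only [List.getElem_map, h0, List.getElem_zip]
    have e1 : PySem.List.pyGetD p (k : Int) 0 = p[k]'(by omega) := by
      rw [PySem.List.pyGetD_natCast]; exact List.getD_eq_getElem p 0 (by omega)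
    have e2 : PySem.List.pyGetD p ((k : Int) + 1) 0 = p[k + 1]'(by omega) := by
      have : ((k : Int) + 1) = ((k + 1 : Nat) : Int) := by push_cast; ring
      rw [this, PySem.List.pyGetD_natCast]
      exact List.getD_eq_getElem p 0 (by omega)
    rw [e1, e2]
    congr 1
    rw [List.getElem_tail]

-- A's inner loop over edges of path2: each match appends the SAME pair edge1.
theorem pv_inner_count (e : Int × Int) (l : List (Int × Int)) (acc : List (Int × Int)) :
    l.foldl (fun acc e2 => if e = e2 then acc ++ [e] else acc) acc
    = acc ++ List.replicate (l.count e) e := by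
  induction l generalizing acc with
  | nil => simp
  | cons h t ih =>
    by_cases he : e = h
    · subst he
      simp [List.foldl_cons, ih, List.replicate_succ]
    · simp [ih, he, Ne.symm he]

theorem find_shared_edges_eq_canon (subpaths : List (List Int)) :
    find_shared_edges subpaths =
      let p0 := PySem.List.pyGetD subpaths 0 []
      let p1 := PySem.List.pyGetD subpaths 1 []
      (p0.zip p0.tail).foldl
        (fun acc e => acc ++ List.replicate ((p1.zip p1.tail).count e) e) [] := by
  unfold find_shared_edges
  set p0 := PySem.List.pyGetD subpaths 0 [] with hp0
  set p1 := PySem.List.pyGetD subpaths 1 [] with hp1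
  simp only []
  -- rewrite the inner loop via the zip view of p1's edges
  have hinner : ∀ (e : Int × Int) (acc : List (Int × Int)),
      (PySem.List.pyRange 0 ((p1.length : Int) - 1) 1).foldl (fun acc j =>
        if e = (PySem.List.pyGetD p1 j 0, PySem.List.pyGetD p1 (j + 1) 0)
        then acc ++ [e] else acc) acc
      = acc ++ List.replicate ((p1.zip p1.tail).count e) e := by
    intro e acc
    rw [← pv_map_edge p1, ← pv_inner_count e, List.foldl_map]
  -- rewrite the outer loop via the zip view of p0's edges
  rw [← pv_map_edge p0, List.foldl_map]
  apply PySem.List.foldl_congr_mem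
  intro acc i _
  exact hinner _ acc

theorem find_shared_edges_alt_eq_canon (subpaths : List (List Int)) :
    find_shared_edges_alt subpaths =
      let p0 := PySem.List.pyGetD subpaths 0 []
      let p1 := PySem.List.pyGetD subpaths 1 []
      (p0.zip p0.tail).foldl
        (fun acc e => acc ++ List.replicate ((p1.zip p1.tail).count e) e) [] := by
  unfold find_shared_edges_alt
  set p0 := PySem.List.pyGetD subpaths 0 [] with hp0
  set p1 := PySem.List.pyGetD subpaths 1 [] with hp1
  simp only [PySem.List.slice_from_one]
  apply PySem.List.foldl_congr_mem
  intro acc e _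
  congr 1
  rw [PySem.List.pyRepeat_singleton]
  congr 1
  have := PySem.Dict.getD_foldl_insert_add_one (l := p1.zip p1.tail)
    (d := (PySem.Dict.empty : PySem.Dict (Int × Int) Int)) (v := e)
  rw [this, PySem.Dict.getD_empty]
  simp

-- ===== VERDICT (by name: the statement is the Claim_ definition above) =====
theorem find_shared_edges_spec : Claim_equal_find_shared_edges := by
  intro subpaths _ _
  unfold Spec_find_shared_edges
  rw [find_shared_edges_eq_canon, find_shared_edges_alt_eq_canon]
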